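-- pv_equiv track=rewrite | github.com/Oeilomega/Intro_IA | ba_inspector_src/StateInfo.py | findBestConfiguration
-- ===== SOURCE A (Python) =====
-- def findBestConfiguration(ratios):
--     index = 0
--     inspector_best = []
--     for config in ratios:
--         inspector_best.append(config['group'] - config['solo'])
--         if (inspector_best[index] < 0):
--             inspector_best[index] = 0 - inspector_best[index]
--         index += 1
--     index = 0
--     best_pos = 0
--     for value in inspector_best:
--         if (value < inspector_best[best_pos]):
--             best_pos = index
--         index += 1
--     return best_pos
-- ===== SOURCE B (Python) =====
-- def findBestConfiguration(ratios):
--     best_pos = 0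
--     best_val = None
--     for i, config in enumerate(ratios):
--         diff = abs(config['group'] - config['solo'])
--         if best_val is None or diff < best_val:
--             best_val = diff
--             best_pos = i
--     return best_pos
-- ===== Notes on version B (the rewrite author's own statement) =====
-- stated objective: simpler
-- what changed: Replaces A's two sequential passes (build a list of absolute group-solo differences, then scan it with repeated indexing to find the first minimum) with a single enumerate pass that keeps best_pos/best_val and never materialises the intermediate list.
import Mathlib
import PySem

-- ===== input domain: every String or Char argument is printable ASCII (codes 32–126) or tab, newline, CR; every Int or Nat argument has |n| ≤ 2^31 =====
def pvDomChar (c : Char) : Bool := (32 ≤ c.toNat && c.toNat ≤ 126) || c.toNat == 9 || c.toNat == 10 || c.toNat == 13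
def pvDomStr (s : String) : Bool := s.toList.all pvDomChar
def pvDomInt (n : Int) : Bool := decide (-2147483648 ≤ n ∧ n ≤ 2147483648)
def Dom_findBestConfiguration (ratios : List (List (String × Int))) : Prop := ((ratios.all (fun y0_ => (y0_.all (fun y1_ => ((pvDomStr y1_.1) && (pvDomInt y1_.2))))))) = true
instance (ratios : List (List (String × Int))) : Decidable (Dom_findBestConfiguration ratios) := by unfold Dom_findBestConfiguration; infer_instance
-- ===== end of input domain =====

-- B replaces A's two passes (build the list of absolute differences, then scan it by index
-- for the first minimum) by one enumerate pass keeping best_pos/best_val; objective: simpler.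

-- config[k] for both ports (dict lookup = first match in the association list).
-- Pre_ excludes configs missing a key, where Python raises KeyError; the default 0 is never used inside Pre_.
def pvLookup (c : List (String × Int)) (k : String) : Int :=
  ((c.find? (fun p => p.1 == k)).map Prod.snd).getD 0

-- ===== PORT A =====
-- first loop: state (index, inspector_best); append diff, then negate in place if negative
def pvA_step1 (st : Int × List Int) (config : List (String × Int)) : Int × List Int :=
  let ib := st.2 ++ [pvLookup config "group" - pvLookup config "solo"]
  let ib' := match PySem.List.pyGet? ib st.1 with
    | some v => if v < 0 then ib.set st.1.toNat (0 - v) else ib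
    | none => ib      -- unreachable: index is always in range
  (st.1 + 1, ib')

-- second loop: state (index, best_pos); compare value with inspector_best[best_pos]
def pvA_step2 (ib : List Int) (st : Int × Int) (value : Int) : Int × Int :=
  let bp := match PySem.List.pyGet? ib st.2 with
    | some w => if value < w then st.1 else st.2
    | none => st.2    -- unreachable: best_pos is always in range
  (st.1 + 1, bp)

def findBestConfiguration (ratios : List (List (String × Int))) : Int :=
  let inspector_best := (ratios.foldl pvA_step1 (0, [])).2
  (inspector_best.foldl (pvA_step2 inspector_best) (0, 0)).2

-- ===== PORT B =====
-- single pass: state (best_pos, best_val); best_val is None only before the first element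
def pvB_step (st : Int × Option Int) (p : Int × List (String × Int)) : Int × Option Int :=
  let diff := |pvLookup p.2 "group" - pvLookup p.2 "solo"|
  match st.2 with
  | none => (p.1, some diff)
  | some bv => if diff < bv then (p.1, some diff) else st

def findBestConfiguration_alt (ratios : List (List (String × Int))) : Int :=
  ((PySem.List.enumerate ratios 0).foldl pvB_step (0, none)).1

-- ===== PRECONDITION & SPEC =====
-- Pre_ excludes exactly the inputs where Python's A raises KeyError: a config without
-- a "group" or "solo" key.
def Pre_findBestConfiguration (ratios : List (List (String × Int))) : Prop :=
  ∀ c ∈ ratios, "group" ∈ c.map Prod.fst ∧ "solo" ∈ c.map Prod.fst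
instance (ratios : List (List (String × Int))) : Decidable (Pre_findBestConfiguration ratios) := by
  unfold Pre_findBestConfiguration; infer_instance
def pvWitness_findBestConfiguration : (List (List (String × Int))) :=
  [[("group", 3), ("solo", 1)], [("group", 1), ("solo", 2)]]

def Spec_findBestConfiguration (ratios : List (List (String × Int))) (out : Int) : Prop := out = findBestConfiguration_alt ratios
instance (ratios : List (List (String × Int))) (out : Int) : Decidable (Spec_findBestConfiguration ratios out) := by unfold Spec_findBestConfiguration; infer_instance

-- ===== CLAIM (what is proved, stated in full; the proofs are below) =====
def Claim_equal_findBestConfiguration : Prop := ∀ (ratios : List (List (String × Int))), Dom_findBestConfiguration ratios → Pre_findBestConfiguration ratios → Spec_findBestConfiguration ratios (findBestConfiguration ratios)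

-- ===== LEMMAS AND PROOFS =====

-- the absolute difference A and B both compute per config
def pvAbsDiff (c : List (String × Int)) : Int :=
  |pvLookup c "group" - pvLookup c "solo"|

theorem pvB_step_some (bp bv i : Int) (c : List (String × Int)) :
    pvB_step (bp, some bv) (i, c)
      = if pvAbsDiff c < bv then (i, some (pvAbsDiff c)) else (bp, some bv) := by
  simp [pvB_step, pvAbsDiff]

theorem pvA_loop1 (t : List (List (String × Int))) :
    ∀ acc : List Int,
      t.foldl pvA_step1 ((acc.length : Int), acc) = (((acc.length + t.length : Nat) : Int), acc ++ t.map pvAbsDiff) := by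
  induction t with
  | nil => intro acc; simp
  | cons c t ih =>
    intro acc
    have hstep : pvA_step1 ((acc.length : Int), acc) c
        = ((((acc ++ [pvAbsDiff c]).length : Nat) : Int), acc ++ [pvAbsDiff c]) := by
      simp only [pvA_step1]
      have hget : PySem.List.pyGet? (acc ++ [pvLookup c "group" - pvLookup c "solo"]) (acc.length : Int)
          = some (pvLookup c "group" - pvLookup c "solo") := by
        simpa using PySem.List.pyGet?_append_length acc [] (pvLookup c "group" - pvLookup c "solo")
      rw [hget]
      by_cases h : pvLookup c "group" - pvLookup c "solo" < 0
      · simp only [h, if_pos]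
        simp [pvAbsDiff, abs_of_neg h]
      · simp [h, pvAbsDiff, abs_of_nonneg (by omega : (0:Int) ≤ pvLookup c "group" - pvLookup c "solo")]
    rw [List.foldl_cons, hstep, ih]
    simp
    omega

-- the core correspondence: A's index scan over the tail t of the abs list, versus B's
-- enumerate fold over the tail, once both carry a current best (bp, bv) with bv = L[bp]
theorem pvKey (t : List (List (String × Int))) :
    ∀ (pre : List (List (String × Int))) (bp bv : Int),
      PySem.List.pyGet? ((pre ++ t).map pvAbsDiff) bp = some bv →
      ((t.map pvAbsDiff).foldl (pvA_step2 ((pre ++ t).map pvAbsDiff)) ((pre.length : Int), bp)).2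
        = ((PySem.List.enumerate t (pre.length : Int)).foldl pvB_step (bp, some bv)).1 := by
  induction t with
  | nil => intro pre bp bv _; simp [PySem.List.enumerate_nil]
  | cons c t ih =>
    intro pre bp bv hget
    have hgetc : PySem.List.pyGet? ((pre ++ c :: t).map pvAbsDiff) ((pre.length : Int))
        = some (pvAbsDiff c) := by
      have := PySem.List.pyGet?_append_length (pre.map pvAbsDiff) (t.map pvAbsDiff) (pvAbsDiff c)
      simpa using this
    have hassoc : pre ++ c :: t = (pre ++ [c]) ++ t := by simp
    have hstepA : pvA_step2 ((pre ++ c :: t).map pvAbsDiff) ((pre.length : Int), bp) (pvAbsDiff c)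
        = ((pre.length : Int) + 1, if pvAbsDiff c < bv then (pre.length : Int) else bp) := by
      simp only [pvA_step2, hget]
    rw [PySem.List.enumerate_cons, List.map_cons, List.foldl_cons, List.foldl_cons,
      hstepA, pvB_step_some]
    by_cases h : pvAbsDiff c < bv
    · rw [if_pos h, if_pos h]
      have h1 := ih (pre ++ [c]) ((pre.length : Int)) (pvAbsDiff c)
        (by rw [← hassoc]; exact hgetc)
      simp only [List.length_append, List.length_cons, List.length_nil, Nat.cast_add,
        Nat.cast_one] at h1
      rw [← hassoc] at h1
      simpa using h1
    · rw [if_neg h, if_neg h]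
      have h1 := ih (pre ++ [c]) bp bv (by rw [← hassoc]; exact hget)
      simp only [List.length_append, List.length_cons, List.length_nil, Nat.cast_add,
        Nat.cast_one] at h1
      rw [← hassoc] at h1
      simpa using h1

-- ===== VERDICT (by name: the statement is the Claim_ definition above) =====
theorem findBestConfiguration_spec : Claim_equal_findBestConfiguration := by
  intro ratios _ _
  have h1 := pvA_loop1 ratios []
  simp only [List.length_nil, Nat.cast_zero, List.nil_append, Nat.zero_add] at h1
  simp only [Spec_findBestConfiguration, findBestConfiguration, findBestConfiguration_alt, h1]
  cases ratios with
  | nil => simp [PySem.List.enumerate_nil]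
  | cons c t =>
    rw [PySem.List.enumerate_cons, List.foldl_cons]
    have hB0 : pvB_step (0, none) ((0 : Int), c) = (0, some (pvAbsDiff c)) := by
      simp [pvB_step, pvAbsDiff]
    rw [hB0, List.map_cons, List.foldl_cons]
    have hget0 : PySem.List.pyGet? (pvAbsDiff c :: t.map pvAbsDiff) (0 : Int) = some (pvAbsDiff c) :=
      PySem.List.pyGet?_zero_cons _ _
    have hA0 : pvA_step2 (pvAbsDiff c :: t.map pvAbsDiff) (0, 0) (pvAbsDiff c) = (1, 0) := by
      simp [pvA_step2]
    rw [hA0]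
    have := pvKey t [c] 0 (pvAbsDiff c) (by simpa using hget0)
    simpa using this
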